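-- pv_equiv track=rewrite | github.com/yehonatancohen/gold-phone-numbers-finder | 2. filter.py | ends_with_3_zeros
-- ===== SOURCE A (Python) =====
-- def ends_with_3_zeros(num):
--     amount = 0
--     for i in reversed(num):
--         if amount > 2:
--             return True
--         if i != 0:
--             amount = 0
--         else:
--             amount += 1
--     if amount > 2:
--         return True
--     else:
--         return False
-- ===== SOURCE B (Python) =====
-- def ends_with_3_zeros(num):
--     xs = list(num)
--     return any(a == b == c == 0 for a, b, c in zip(xs, xs[1:], xs[2:]))
-- ===== Notes on version B (the rewrite author's own statement) =====
-- stated objective: idiomatic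
-- what changed: The reversed counter-reset scan with early return is replaced by a sliding-window zip(xs, xs[1:], xs[2:]) checking any three consecutive zeros, with no reversal and no mutable counter.
import Mathlib
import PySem

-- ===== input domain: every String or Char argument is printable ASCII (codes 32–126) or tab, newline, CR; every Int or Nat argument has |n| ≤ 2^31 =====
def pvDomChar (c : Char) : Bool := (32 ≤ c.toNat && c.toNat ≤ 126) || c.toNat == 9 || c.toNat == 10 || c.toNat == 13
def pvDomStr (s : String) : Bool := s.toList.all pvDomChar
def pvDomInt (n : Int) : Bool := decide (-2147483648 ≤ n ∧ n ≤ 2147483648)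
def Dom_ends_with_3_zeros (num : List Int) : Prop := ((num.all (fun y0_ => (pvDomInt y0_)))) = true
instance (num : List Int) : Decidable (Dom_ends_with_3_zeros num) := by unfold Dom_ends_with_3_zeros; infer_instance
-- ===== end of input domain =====

-- B replaces A's reversed counter-reset scan by an idiomatic sliding-window zip over
-- three consecutive elements; return value equivalence is proved for all Int lists.

-- ===== PORT A =====
-- the for-loop over reversed(num) with the mutable counter `amount` and early return
def endsLoopA : List Int → Int → Bool
  | [], amount => amount > 2
  | i :: rest, amount =>
    if amount > 2 then true
    else if i ≠ 0 then endsLoopA rest 0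
    else endsLoopA rest (amount + 1)

def ends_with_3_zeros (num : List Int) : Bool := endsLoopA num.reverse 0

-- ===== PORT B =====
-- any(a == b == c == 0 for a, b, c in zip(xs, xs[1:], xs[2:]))
def ends_with_3_zeros_alt (num : List Int) : Bool :=
  ((num.zip (num.drop 1)).zip (num.drop 2)).any
    (fun p => p.1.1 == p.1.2 && p.1.2 == p.2 && p.2 == 0)

-- ===== PRECONDITION & SPEC =====
def Spec_ends_with_3_zeros (num : List Int) (out : Bool) : Prop := out = ends_with_3_zeros_alt num
instance (num : List Int) (out : Bool) : Decidable (Spec_ends_with_3_zeros num out) := by unfold Spec_ends_with_3_zeros; infer_instance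

-- ===== CLAIM (what is proved, stated in full; the proofs are below) =====
def Claim_equal_ends_with_3_zeros : Prop := ∀ (num : List Int), Dom_ends_with_3_zeros num → Spec_ends_with_3_zeros num (ends_with_3_zeros num)

-- ===== LEMMAS AND PROOFS =====

-- a list shorter than 3 has no [0,0,0] infix
theorem no_infix_short (l : List Int) (h : l.length < 3) : ¬ ([0, 0, 0] <:+: l) := by
  intro hi
  have := hi.sublist.length_le
  simp at this
  omega

-- peeling a nonzero head preserves the [0,0,0]-infix property
theorem peel_nonzero (i : Int) (hi : i ≠ 0) (l : List Int) :
    ([0, 0, 0] <:+: i :: l) ↔ ([0, 0, 0] <:+: l) := by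
  rw [List.infix_cons_iff]
  constructor
  · rintro (hp | h)
    · rw [List.cons_prefix_cons] at hp
      exact absurd hp.1.symm hi
    · exact h
  · exact Or.inr

-- A's loop with counter a (0 ≤ a) answers: does [0,0,0] occur in a zeros followed by l?
theorem endsLoopA_iff (l : List Int) : ∀ a : Int, 0 ≤ a →
    (endsLoopA l a = true ↔ [0, 0, 0] <:+: (List.replicate a.toNat 0 ++ l)) := by
  induction l with
  | nil =>
    intro a ha
    simp [endsLoopA, List.infix_replicate_iff]
    omega
  | cons i rest ih =>
    intro a ha
    by_cases hgt : a > 2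
    · have h3 : (3 : ℕ) ≤ a.toNat := by omega
      simp only [endsLoopA, if_pos hgt, true_iff]
      refine ⟨[], List.replicate (a.toNat - 3) 0 ++ i :: rest, ?_⟩
      have hsplit : a.toNat = 3 + (a.toNat - 3) := by omega
      rw [List.nil_append]
      conv_rhs => rw [hsplit, List.replicate_add]
      simp
    · by_cases hi : i = 0
      · subst hi
        rw [show endsLoopA (0 :: rest) a = endsLoopA rest (a + 1) by
          simp [endsLoopA, hgt]]
        rw [ih (a + 1) (by omega)]
        have : List.replicate (a + 1).toNat (0 : Int) = List.replicate a.toNat 0 ++ [0] := by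
          have h1 : (a + 1).toNat = a.toNat + 1 := by omega
          rw [h1, List.replicate_succ']
        rw [this, List.append_assoc]
        rfl
      · simp only [endsLoopA, if_neg hgt, if_pos hi]
        rw [ih 0 (by omega)]
        have hle : a.toNat ≤ 2 := by omega
        have key : ([0, 0, 0] <:+: List.replicate a.toNat (0 : Int) ++ i :: rest)
            ↔ ([0, 0, 0] <:+: rest) := by
          interval_cases h : a.toNat
          · simpa using peel_nonzero i hi rest
          · simp only [List.replicate, List.cons_append, List.nil_append]
            rw [List.infix_cons_iff, peel_nonzero i hi rest]
            constructor
            · rintro (hp | h)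
              · rw [List.cons_prefix_cons] at hp
                rw [List.cons_prefix_cons] at hp
                exact absurd hp.2.1.symm hi
              · exact h
            · exact Or.inr
          · simp only [List.replicate, List.cons_append, List.nil_append]
            rw [List.infix_cons_iff, List.infix_cons_iff, peel_nonzero i hi rest]
            constructor
            · rintro (hp | hp | h)
              · rw [List.cons_prefix_cons, List.cons_prefix_cons, List.cons_prefix_cons] at hp
                exact absurd hp.2.2.1.symm hi
              · rw [List.cons_prefix_cons, List.cons_prefix_cons] at hp
                exact absurd hp.2.1.symm hi
              · exact h
            · exact fun h => Or.inr (Or.inr h)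
        rw [key]
        simp

-- B's sliding window answers the same question about num itself
theorem alt_iff (l : List Int) : (ends_with_3_zeros_alt l = true ↔ [0, 0, 0] <:+: l) := by
  induction l with
  | nil => simp [ends_with_3_zeros_alt]
  | cons a t ih =>
    match t with
    | [] =>
      simp only [ends_with_3_zeros_alt]
      simp
      exact no_infix_short _ (by simp)
    | [b] =>
      simp only [ends_with_3_zeros_alt]
      simp
      exact no_infix_short _ (by simp)
    | b :: c :: k =>
      simp only [ends_with_3_zeros_alt] at ih ⊢
      simp only [List.drop, List.zip_cons_cons, List.any_cons] at ih ⊢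
      rw [Bool.or_eq_true, ih, List.infix_cons_iff (l₂ := b :: c :: k)]
      constructor
      · rintro (hb | h)
        · left
          simp at hb
          obtain ⟨⟨h1, h2⟩, h3⟩ := hb
          rw [List.cons_prefix_cons, List.cons_prefix_cons, List.cons_prefix_cons]
          refine ⟨by omega, by omega, by omega, List.nil_prefix⟩
        · exact Or.inr h
      · rintro (hp | h)
        · left
          rw [List.cons_prefix_cons, List.cons_prefix_cons, List.cons_prefix_cons] at hp
          simp
          omega
        · exact Or.inr h

-- ===== VERDICT (by name: the statement is the Claim_ definition above) =====
theorem ends_with_3_zeros_spec : Claim_equal_ends_with_3_zeros := by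
  intro num _
  show ends_with_3_zeros num = ends_with_3_zeros_alt num
  rw [Bool.eq_iff_iff]
  rw [show ends_with_3_zeros num = endsLoopA num.reverse 0 from rfl]
  rw [endsLoopA_iff num.reverse 0 le_rfl]
  rw [alt_iff]
  simp only [Int.toNat_zero, List.replicate_zero, List.nil_append]
  constructor
  · intro h
    have := h.reverse
    simpa using this
  · intro h
    have := h.reverse
    simpa using this
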